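-- pv_equiv track=rewrite | github.com/EdiBig/bioagent | agents/specialists/qc_reviewer.py | _build_qc_checklist
-- ===== SOURCE A (Python) =====
-- def _build_qc_checklist(task: str) -> list[str]:
--     """
--     Build a QC checklist based on the analysis type.
--
--     Returns list of QC items to check.
--     """
--     task_lower = task.lower()
--     checklist = []
--
--     # General QC items
--     checklist.extend([
--         "Check for missing or invalid values",
--         "Verify sample sizes and replication",
--         "Assess data distributions",
--     ])
--
--     # RNA-seq specific
--     if any(w in task_lower for w in ["rna-seq", "rnaseq", "expression", "deseq", "edger"]):
--         checklist.extend([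
--             "Check mapping rates (expect >70%)",
--             "Assess duplication rates (<30% typical)",
--             "Review library complexity",
--             "Check for 3'/5' bias",
--             "Verify gene detection rates",
--             "Assess sample clustering (PCA)",
--             "Check for batch effects",
--         ])
--
--     # Differential expression
--     if any(w in task_lower for w in ["differential", "de analysis", "deg", "dge"]):
--         checklist.extend([
--             "Verify appropriate normalization",
--             "Check dispersion estimates",
--             "Review p-value distribution (should be uniform under null)",
--             "Assess log2FC distribution",
--             "Verify multiple testing correction applied",
--             "Check MA/volcano plot for asymmetry",
--         ])
--
--     # Variant calling
--     if any(w in task_lower for w in ["variant", "snp", "mutation", "vcf"]):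
--         checklist.extend([
--             "Check Ti/Tv ratio (expect ~2.0 for WGS)",
--             "Assess het/hom ratio",
--             "Review variant depth distribution",
--             "Check for batch effects in variant calls",
--             "Verify genotype quality metrics",
--         ])
--
--     # Single-cell
--     if any(w in task_lower for w in ["single cell", "scrna", "10x", "seurat", "scanpy"]):
--         checklist.extend([
--             "Check cells per sample",
--             "Assess UMI/gene counts per cell",
--             "Review mitochondrial gene fraction",
--             "Check doublet rates",
--             "Assess batch integration quality",
--             "Verify cluster stability",
--         ])
--
--     # Enrichment
--     if any(w in task_lower for w in ["enrichment", "pathway", "go term", "gsea"]):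
--         checklist.extend([
--             "Verify appropriate background used",
--             "Check gene set sizes",
--             "Assess biological coherence of top terms",
--             "Review for redundant/similar terms",
--         ])
--
--     return checklist
-- ===== SOURCE B (Python) =====
-- # B: flat keyword->group map; collect matched group ids as a set, then emit groups in sorted order.
-- _GENERAL = [
--     "Check for missing or invalid values",
--     "Verify sample sizes and replication",
--     "Assess data distributions",
-- ]
--
-- _KEYWORD_GROUP = {
--     "rna-seq": 0, "rnaseq": 0, "expression": 0, "deseq": 0, "edger": 0,
--     "differential": 1, "de analysis": 1, "deg": 1, "dge": 1,
--     "variant": 2, "snp": 2, "mutation": 2, "vcf": 2,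
--     "single cell": 3, "scrna": 3, "10x": 3, "seurat": 3, "scanpy": 3,
--     "enrichment": 4, "pathway": 4, "go term": 4, "gsea": 4,
-- }
--
-- _GROUP_ITEMS = [
--     [
--         "Check mapping rates (expect >70%)",
--         "Assess duplication rates (<30% typical)",
--         "Review library complexity",
--         "Check for 3'/5' bias",
--         "Verify gene detection rates",
--         "Assess sample clustering (PCA)",
--         "Check for batch effects",
--     ],
--     [
--         "Verify appropriate normalization",
--         "Check dispersion estimates",
--         "Review p-value distribution (should be uniform under null)",
--         "Assess log2FC distribution",
--         "Verify multiple testing correction applied",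
--         "Check MA/volcano plot for asymmetry",
--     ],
--     [
--         "Check Ti/Tv ratio (expect ~2.0 for WGS)",
--         "Assess het/hom ratio",
--         "Review variant depth distribution",
--         "Check for batch effects in variant calls",
--         "Verify genotype quality metrics",
--     ],
--     [
--         "Check cells per sample",
--         "Assess UMI/gene counts per cell",
--         "Review mitochondrial gene fraction",
--         "Check doublet rates",
--         "Assess batch integration quality",
--         "Verify cluster stability",
--     ],
--     [
--         "Verify appropriate background used",
--         "Check gene set sizes",
--         "Assess biological coherence of top terms",
--         "Review for redundant/similar terms",
--     ],
-- ]
--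
--
-- def _build_qc_checklist(task: str) -> list[str]:
--     t = task.lower()
--     hit_groups = sorted({g for kw, g in _KEYWORD_GROUP.items() if kw in t})
--     return _GENERAL + [item for g in hit_groups for item in _GROUP_ITEMS[g]]
-- ===== Notes on version B (the rewrite author's own statement) =====
-- stated objective: alternative
-- what changed: Instead of five per-group any()-conditional extend blocks, B indexes each keyword into a flat keyword-to-group map, computes the SET of matched group ids in one scan over all keywords, and assembles the output by concatenating the item lists of the matched groups in sorted id order.
import Mathlib
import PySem

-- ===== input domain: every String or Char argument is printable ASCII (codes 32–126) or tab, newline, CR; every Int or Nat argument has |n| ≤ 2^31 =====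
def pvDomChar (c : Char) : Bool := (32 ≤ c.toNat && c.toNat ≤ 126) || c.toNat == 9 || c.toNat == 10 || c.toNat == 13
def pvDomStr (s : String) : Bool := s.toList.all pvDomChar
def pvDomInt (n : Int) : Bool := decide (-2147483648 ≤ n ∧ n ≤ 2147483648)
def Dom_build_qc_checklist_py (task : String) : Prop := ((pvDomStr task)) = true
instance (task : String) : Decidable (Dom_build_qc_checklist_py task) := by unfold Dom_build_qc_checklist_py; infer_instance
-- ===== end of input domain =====

-- B replaces A's five keyword-conditional extend blocks by a flat keyword→group map: one scan
-- collects the set of matched group ids, then the matched groups' item lists are concatenated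
-- in sorted id order (objective: alternative).

-- ===== PORT A =====
-- Literal port of A: five sequential keyword-conditional extends on an accumulator.
def build_qc_checklist_py (task : String) : List String :=
  let task_lower := PySem.Str.lower task
  let checklist : List String := [ "Check for missing or invalid values", "Verify sample sizes and replication", "Assess data distributions" ]
  let checklist :=
    if ([ "rna-seq", "rnaseq", "expression", "deseq", "edger" ].any (fun w => PySem.Str.isIn w task_lower)) then
      checklist ++ [ "Check mapping rates (expect >70%)", "Assess duplication rates (<30% typical)", "Review library complexity", "Check for 3'/5' bias", "Verify gene detection rates", "Assess sample clustering (PCA)", "Check for batch effects" ]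
    else checklist
  let checklist :=
    if ([ "differential", "de analysis", "deg", "dge" ].any (fun w => PySem.Str.isIn w task_lower)) then
      checklist ++ [ "Verify appropriate normalization", "Check dispersion estimates", "Review p-value distribution (should be uniform under null)", "Assess log2FC distribution", "Verify multiple testing correction applied", "Check MA/volcano plot for asymmetry" ]
    else checklist
  let checklist :=
    if ([ "variant", "snp", "mutation", "vcf" ].any (fun w => PySem.Str.isIn w task_lower)) then
      checklist ++ [ "Check Ti/Tv ratio (expect ~2.0 for WGS)", "Assess het/hom ratio", "Review variant depth distribution", "Check for batch effects in variant calls", "Verify genotype quality metrics" ]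
    else checklist
  let checklist :=
    if ([ "single cell", "scrna", "10x", "seurat", "scanpy" ].any (fun w => PySem.Str.isIn w task_lower)) then
      checklist ++ [ "Check cells per sample", "Assess UMI/gene counts per cell", "Review mitochondrial gene fraction", "Check doublet rates", "Assess batch integration quality", "Verify cluster stability" ]
    else checklist
  let checklist :=
    if ([ "enrichment", "pathway", "go term", "gsea" ].any (fun w => PySem.Str.isIn w task_lower)) then
      checklist ++ [ "Verify appropriate background used", "Check gene set sizes", "Assess biological coherence of top terms", "Review for redundant/similar terms" ]
    else checklist
  checklist

-- ===== PORT B =====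
-- _GENERAL
def qcGeneral : List String := [ "Check for missing or invalid values", "Verify sample sizes and replication", "Assess data distributions" ]

-- _KEYWORD_GROUP (dict literal → assoc list in insertion order)
def kwGroup : List (String × Int) :=
  [ ("rna-seq", 0), ("rnaseq", 0), ("expression", 0), ("deseq", 0), ("edger", 0),
    ("differential", 1), ("de analysis", 1), ("deg", 1), ("dge", 1),
    ("variant", 2), ("snp", 2), ("mutation", 2), ("vcf", 2),
    ("single cell", 3), ("scrna", 3), ("10x", 3), ("seurat", 3), ("scanpy", 3),
    ("enrichment", 4), ("pathway", 4), ("go term", 4), ("gsea", 4) ]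

-- _GROUP_ITEMS
def groupItems : List (List String) :=
  [ [ "Check mapping rates (expect >70%)", "Assess duplication rates (<30% typical)", "Review library complexity", "Check for 3'/5' bias", "Verify gene detection rates", "Assess sample clustering (PCA)", "Check for batch effects" ],
    [ "Verify appropriate normalization", "Check dispersion estimates", "Review p-value distribution (should be uniform under null)", "Assess log2FC distribution", "Verify multiple testing correction applied", "Check MA/volcano plot for asymmetry" ],
    [ "Check Ti/Tv ratio (expect ~2.0 for WGS)", "Assess het/hom ratio", "Review variant depth distribution", "Check for batch effects in variant calls", "Verify genotype quality metrics" ],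
    [ "Check cells per sample", "Assess UMI/gene counts per cell", "Review mitochondrial gene fraction", "Check doublet rates", "Assess batch integration quality", "Verify cluster stability" ],
    [ "Verify appropriate background used", "Check gene set sizes", "Assess biological coherence of top terms", "Review for redundant/similar terms" ] ]

-- B: set comprehension over the flat keyword map, sorted group ids, one flattening pass.
def build_qc_checklist_py_alt (task : String) : List String :=
  let t := PySem.Str.lower task
  let hitGroups : List Int :=
    PySem.List.sorted
      (PySem.Set.ofList ((kwGroup.filter (fun p => PySem.Str.isIn p.1 t)).map (·.2)))
      (fun x => x) false
  qcGeneral ++ hitGroups.flatMap (fun g => PySem.List.pyGetD groupItems g [])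

-- ===== PRECONDITION & SPEC =====
def Spec_build_qc_checklist_py (task : String) (out : List String) : Prop := out = build_qc_checklist_py_alt task
instance (task : String) (out : List String) : Decidable (Spec_build_qc_checklist_py task out) := by unfold Spec_build_qc_checklist_py; infer_instance

-- ===== CLAIM (what is proved, stated in full; the proofs are below) =====
def Claim_equal_build_qc_checklist_py : Prop := ∀ (task : String), Dom_build_qc_checklist_py task → Spec_build_qc_checklist_py task (build_qc_checklist_py task)

-- ===== LEMMAS AND PROOFS =====

-- the i-th keyword group of the flat map, and its match condition
def kwG (i : Nat) : List (String × Int) := kwGroup.filter (fun p => p.2 = (i : Int))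

def cGrp (i : Nat) (t : String) : Bool := (kwG i).any (fun p => PySem.Str.isIn p.1 t)

lemma kwGroup_split : kwGroup = kwG 0 ++ kwG 1 ++ kwG 2 ++ kwG 3 ++ kwG 4 := by decide

lemma kwG_snd (i : Nat) (hi : i < 5) : ∀ p ∈ kwG i, p.2 = (i : Int) := by
  interval_cases i <;> decide

lemma mem_filtered_group (i : Nat) (hi : i < 5) (t : String) (x : Int) :
    x ∈ ((kwG i).filter (fun p => PySem.Str.isIn p.1 t)).map (·.2) ↔
      cGrp i t = true ∧ x = (i : Int) := by
  simp only [List.mem_map, List.mem_filter, cGrp, List.any_eq_true]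
  constructor
  · rintro ⟨p, ⟨hp, hP⟩, rfl⟩
    exact ⟨⟨p, hp, hP⟩, kwG_snd i hi p hp⟩
  · rintro ⟨⟨p, hp, hP⟩, rfl⟩
    exact ⟨p, ⟨hp, hP⟩, kwG_snd i hi p hp⟩

lemma hits_eq (t : String) :
    PySem.List.sorted
      (PySem.Set.ofList ((kwGroup.filter (fun p => PySem.Str.isIn p.1 t)).map (·.2)))
      (fun x => x) false
    = ((if cGrp 0 t then [(0 : Int)] else []) ++ (if cGrp 1 t then [1] else []) ++
       (if cGrp 2 t then [2] else []) ++ (if cGrp 3 t then [3] else []) ++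
       (if cGrp 4 t then [4] else [])) := by
  refine List.Perm.eq_of_pairwise (le := (· ≤ ·)) (fun a b _ _ h1 h2 => le_antisymm h1 h2) ?_ ?_ ?_
  · exact (PySem.List.sorted_ofList_pairwise_lt _).imp le_of_lt
  · split_ifs <;> decide
  · apply (List.perm_ext_iff_of_nodup
      (((PySem.List.sorted_perm _ _ _).nodup_iff).mpr (PySem.Set.nodup_ofList _))
      (by split_ifs <;> decide)).mpr
    intro x
    rw [PySem.List.mem_sorted, PySem.Set.mem_ofList, kwGroup_split]
    simp only [List.filter_append, List.map_append, List.mem_append,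
      mem_filtered_group 0 (by omega) t x, mem_filtered_group 1 (by omega) t x,
      mem_filtered_group 2 (by omega) t x, mem_filtered_group 3 (by omega) t x,
      mem_filtered_group 4 (by omega) t x]
    constructor
    · rintro ((((h | h) | h) | h) | h) <;> simp [h.1, h.2]
    · intro h
      split_ifs at h <;> simp_all

lemma cGrp_eq_0 (t : String) :
    cGrp 0 t = ([ "rna-seq", "rnaseq", "expression", "deseq", "edger" ].any (fun w => PySem.Str.isIn w t)) := by
  simp [cGrp, kwG, kwGroup, List.filter, List.any]
lemma cGrp_eq_1 (t : String) :
    cGrp 1 t = ([ "differential", "de analysis", "deg", "dge" ].any (fun w => PySem.Str.isIn w t)) := by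
  simp [cGrp, kwG, kwGroup, List.filter, List.any]
lemma cGrp_eq_2 (t : String) :
    cGrp 2 t = ([ "variant", "snp", "mutation", "vcf" ].any (fun w => PySem.Str.isIn w t)) := by
  simp [cGrp, kwG, kwGroup, List.filter, List.any]
lemma cGrp_eq_3 (t : String) :
    cGrp 3 t = ([ "single cell", "scrna", "10x", "seurat", "scanpy" ].any (fun w => PySem.Str.isIn w t)) := by
  simp [cGrp, kwG, kwGroup, List.filter, List.any]
lemma cGrp_eq_4 (t : String) :
    cGrp 4 t = ([ "enrichment", "pathway", "go term", "gsea" ].any (fun w => PySem.Str.isIn w t)) := by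
  simp [cGrp, kwG, kwGroup, List.filter, List.any]

-- ===== VERDICT (by name: the statement is the Claim_ definition above) =====
theorem build_qc_checklist_py_spec : Claim_equal_build_qc_checklist_py := by
  intro task _
  unfold Spec_build_qc_checklist_py
  simp only [build_qc_checklist_py, build_qc_checklist_py_alt]
  rw [hits_eq (PySem.Str.lower task),
      cGrp_eq_0, cGrp_eq_1, cGrp_eq_2, cGrp_eq_3, cGrp_eq_4]
  split_ifs <;> decide
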